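-- pv_equiv track=rewrite | github.com/jianshenlim/Advancded-algorithms-and-data-structures | mirrored_boyermoore.py | mirroredMatchedPrefix
-- ===== SOURCE A (Python) =====
-- def mirroredMatchedPrefix(pattern):
--     zArray = gusfield(pattern[::-1])
--     mirroredMatchedPrefixArray = [0] * (len(pattern) + 1) # Create mirroredmatchedprefix array of size 1 bigger than pattern, index of 1 for 1st char in string
--     for index in range(1,len(pattern)):
--         totalLength = (len(pattern)-index) + zArray[len(zArray)-index]
--         if totalLength == len(pattern):
--             mirroredMatchedPrefixArray[index] = zArray[len(zArray)-index]
--         else: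
--             mirroredMatchedPrefixArray[index] = mirroredMatchedPrefixArray[index-1] # index of matched prefix is 1 greater than actual index
--     mirroredMatchedPrefixArray[-1] = len(pattern)
--     return mirroredMatchedPrefixArray
--
-- def gusfield(string):
--     zArray = [0]*len(string)  # create zArray of size of input
--     currentLeft = 0
--     currentRight = 0
--     # Base Case for Z2
--     zTwoLength = 0
--     if (len(string) > 1):  # String is greater than 1 char
--         for char in range(1,len(string)):
--             if (string[char] == string[char-1]):
--                 zTwoLength+=1
--             else:
--                 break
--         zArray[1] = zTwoLength  # Set Z2 value to length
--         if zTwoLength == 0: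
--             currentLeft = 0
--             currentRight = 0
--         else:
--             currentLeft = 1
--             currentRight = zTwoLength
--
--     # Pre process rest of String, ie Z2 onwards
--     for stringIndex in range(2,len(string)):  # filling zArray
--         if stringIndex > currentRight:  # Case 1, if k > r
--             currentZ = 0
--             q = 0
--             for subStringChar in range(stringIndex,len(string)): # str[k...q-1]
--                 if string[subStringChar-stringIndex] == string[subStringChar]:
--                     currentZ+=1
--                 else:
--                     zArray[stringIndex] = currentZ
--                     q = subStringChar - 1
--                     break
--             if currentZ > 0:
--                 zArray[stringIndex] = currentZ
--                 currentLeft = stringIndex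
--                 currentRight = q
--
--         else: # Case 2, if k <= r
--             currentZ = 0
--             if zArray[stringIndex-currentLeft] < (currentRight-stringIndex+1): # Case 2a
--                 zArray[stringIndex] = zArray[stringIndex-currentLeft]
--
--             else:  # Case 2b
--                 for char in range(currentRight+1,len(string)):
--                     if string[char] != string[char - stringIndex]:
--                         zArray[stringIndex] = char - stringIndex
--                         currentRight = char - 1
--                         currentLeft = stringIndex
--                         break
--                     elif char + 1  == len(string):
--                         zArray[stringIndex] = char - stringIndex + 1
--                     else:
--                         continue
--     return zArray
-- ===== SOURCE B (Python) =====
-- def mirroredMatchedPrefix(pattern):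
--     # For each index i, record the length of the longest border (a prefix that is
--     # also a suffix) of length at most i, by direct comparison; the final slot
--     # holds the full pattern length.
--     n = len(pattern)
--     m = [0] * (n + 1)
--     prev = 0
--     for i in range(1, n):
--         if pattern[:i] == pattern[n - i:]:
--             prev = i
--         m[i] = prev
--     m[n] = n
--     return m
-- ===== Notes on version B (the rewrite author's own statement) =====
-- stated objective: simpler
-- what changed: B drops the reversed-pattern Z-array machinery and does a direct border scan: for each index i it checks whether the length-i prefix equals the length-i suffix, carrying the last border length forward.
-- intended difference: On patterns consisting of a single repeated character with length >= 3 (e.g. 'aaa'), A's hand-rolled Z-algorithm leaves all intermediate Z-values zero, so A returns [0,0,...,0,n-1,n] missing the short borders, while B returns [0,1,2,...,n-1,n]; every length-i prefix really is a suffix there, so B's values are the intended matched-prefix lengths. — e.g. on mirroredMatchedPrefix("aaa"): A returns [0, 0, 2, 3], B returns [0, 1, 2, 3]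
import Mathlib
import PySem

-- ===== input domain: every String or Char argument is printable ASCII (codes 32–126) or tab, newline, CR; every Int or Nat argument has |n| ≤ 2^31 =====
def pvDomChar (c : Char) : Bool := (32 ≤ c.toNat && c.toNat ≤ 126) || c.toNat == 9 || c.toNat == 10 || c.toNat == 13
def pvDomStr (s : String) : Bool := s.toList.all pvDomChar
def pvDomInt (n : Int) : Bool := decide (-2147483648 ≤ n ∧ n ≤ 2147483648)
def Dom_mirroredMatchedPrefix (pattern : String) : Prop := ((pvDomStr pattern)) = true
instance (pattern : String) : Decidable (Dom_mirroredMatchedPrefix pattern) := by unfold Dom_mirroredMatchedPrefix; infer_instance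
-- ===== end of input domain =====

-- B replaces A's reversed-pattern Z-array computation by a direct border scan; the two agree on
-- every input except single-repeated-character patterns of length ≥ 3 (stated in D_ below),
-- where A's hand-rolled Z-algorithm misses the short borders and B returns the intended values.

-- ===== PORT A =====
-- All indices in A's Python are non-negative throughout (loop ranges start at 0/1/2 and l, r, q
-- stay ≥ 0), so they are ported as Nat; 'for v in range(a, b)' is a structural recursion over the
-- index list List.range' a (b - a) (empty when b ≤ a, exactly Python's range); element access
-- s[i] / zArray[i] is ported as getD (always in range where executed, the default is never hit).

-- 'for char in range(1,len(string)): if s[char]==s[char-1]: zTwoLength+=1 else: break'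
def pvZ2Loop (s : List Char) : List Nat → Nat → Nat
  | [], cnt => cnt
  | ch :: rest, cnt =>
    if s.getD ch ' ' = s.getD (ch - 1) ' ' then pvZ2Loop s rest (cnt + 1) else cnt

-- Case-1 inner loop: returns (currentZ, q)  (q = 0 if the loop ran off the end, Python's init)
def pvCase1Loop (s : List Char) (k : Nat) : List Nat → Nat → Nat × Nat
  | [], cnt => (cnt, 0)
  | j :: rest, cnt =>
    if s.getD (j - k) ' ' = s.getD j ' ' then pvCase1Loop s k rest (cnt + 1)
    else (cnt, j - 1)

-- Case-2b inner loop: returns (zArray[k], currentLeft, currentRight) after the loop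
def pvCase2bLoop (s : List Char) (k z0 l r : Nat) : List Nat → Nat × Nat × Nat
  | [] => (z0, l, r)
  | ch :: rest =>
    if s.getD ch ' ' ≠ s.getD (ch - k) ' ' then (ch - k, k, ch - 1)
    else if ch + 1 = s.length then (ch - k + 1, l, r)
    else pvCase2bLoop s k z0 l r rest

-- 'for stringIndex in range(2,len(string))', state (zArray, currentLeft, currentRight)
def pvGusMain (s : List Char) : List Nat → List Nat → Nat → Nat → List Nat
  | [], z, _, _ => z
  | k :: rest, z, l, r =>
    if k > r then
      let p := pvCase1Loop s k (List.range' k (s.length - k)) 0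
      if p.1 > 0 then pvGusMain s rest (z.set k p.1) k p.2
      else pvGusMain s rest (z.set k p.1) l r
    else
      if z.getD (k - l) 0 < r - k + 1 then
        pvGusMain s rest (z.set k (z.getD (k - l) 0)) l r
      else
        let p := pvCase2bLoop s k 0 l r (List.range' (r + 1) (s.length - (r + 1)))
        pvGusMain s rest (z.set k p.1) p.2.1 p.2.2

def pvGusfield (s : List Char) : List Nat :=
  let z := List.replicate s.length 0
  if s.length > 1 then
    let zTwo := pvZ2Loop s (List.range' 1 (s.length - 1)) 0
    let z := z.set 1 zTwo
    if zTwo = 0 then pvGusMain s (List.range' 2 (s.length - 2)) z 0 0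
    else pvGusMain s (List.range' 2 (s.length - 2)) z 1 zTwo
  else pvGusMain s (List.range' 2 (s.length - 2)) z 0 0

-- 'for index in range(1,len(pattern))'
def pvMirLoop (n : Nat) (z : List Nat) : List Nat → List Int → List Int
  | [], m => m
  | i :: rest, m =>
    let zi := z.getD (z.length - i) 0
    pvMirLoop n z rest
      (if (n - i) + zi = n then m.set i (zi : Int) else m.set i (m.getD (i - 1) 0))

def mirroredMatchedPrefix (pattern : String) : List Int :=
  let s := pattern.toList
  let z := pvGusfield s.reverse      -- gusfield(pattern[::-1])
  let m := List.replicate (s.length + 1) (0 : Int)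
  let m := pvMirLoop s.length z (List.range' 1 (s.length - 1)) m
  m.set (m.length - 1) (s.length : Int)   -- mirroredMatchedPrefixArray[-1] = len(pattern)

-- ===== PORT B =====
-- pattern[:i] / pattern[n-i:] with 0 ≤ i ≤ n are exactly take / drop on the char list.
def pvAltLoop (s : List Char) : List Nat → Nat → List Int → List Int
  | [], _, m => m
  | i :: rest, prev, m =>
    let prev' := if s.take i = s.drop (s.length - i) then i else prev
    pvAltLoop s rest prev' (m.set i (prev' : Int))

def mirroredMatchedPrefix_alt (pattern : String) : List Int :=
  let s := pattern.toList
  let n := s.length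
  let m := List.replicate (n + 1) (0 : Int)
  let m := pvAltLoop s (List.range' 1 (n - 1)) 0 m
  m.set n (n : Int)

-- ===== PRECONDITION & SPEC =====
-- On single-repeated-character patterns of length ≥ 3, A's hand-written Z-algorithm leaves all
-- intermediate Z-values zero, so A returns [0, 0, …, 0, n-1, n] missing the short borders,
-- while B returns [0, 1, 2, …, n-1, n]; every length-i prefix of such a pattern really is a
-- suffix, so B's values are the intended matched-prefix lengths.
def D_mirroredMatchedPrefix (pattern : String) : Prop :=
  3 ≤ pattern.toList.length ∧
    pattern.toList.all (fun c => c == pattern.toList.headD ' ') = true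
instance (pattern : String) : Decidable (D_mirroredMatchedPrefix pattern) := by
  unfold D_mirroredMatchedPrefix; infer_instance

def Spec_mirroredMatchedPrefix (pattern : String) (out : List Int) : Prop :=
  ¬ D_mirroredMatchedPrefix pattern → out = mirroredMatchedPrefix_alt pattern
instance (pattern : String) (out : List Int) : Decidable (Spec_mirroredMatchedPrefix pattern out) := by
  unfold Spec_mirroredMatchedPrefix; infer_instance

def pvDiffWitness_mirroredMatchedPrefix : String := "aaa"
def pvDiffWitnessOut_mirroredMatchedPrefix : (List Int) × (List Int) :=
  ([0, 0, 2, 3], [0, 1, 2, 3])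

-- ===== CLAIM (what is proved, stated in full; the proofs are below) =====
def Claim_unchanged_mirroredMatchedPrefix : Prop := ∀ (pattern : String), Dom_mirroredMatchedPrefix pattern → Spec_mirroredMatchedPrefix pattern (mirroredMatchedPrefix pattern)
def Claim_changed_mirroredMatchedPrefix : Prop := Dom_mirroredMatchedPrefix (pvDiffWitness_mirroredMatchedPrefix) ∧ D_mirroredMatchedPrefix (pvDiffWitness_mirroredMatchedPrefix) ∧ mirroredMatchedPrefix (pvDiffWitness_mirroredMatchedPrefix) = pvDiffWitnessOut_mirroredMatchedPrefix.1 ∧ mirroredMatchedPrefix_alt (pvDiffWitness_mirroredMatchedPrefix) = pvDiffWitnessOut_mirroredMatchedPrefix.2 ∧ pvDiffWitnessOut_mirroredMatchedPrefix.1 ≠ pvDiffWitnessOut_mirroredMatchedPrefix.2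
def Claim_exact_mirroredMatchedPrefix : Prop := ∀ (pattern : String), Dom_mirroredMatchedPrefix pattern → D_mirroredMatchedPrefix pattern → mirroredMatchedPrefix pattern ≠ mirroredMatchedPrefix_alt pattern

-- ===== LEMMAS AND PROOFS =====

-- longest common prefix of two char lists
def pvLcp : List Char → List Char → Nat
  | a :: as, b :: bs => if a = b then pvLcp as bs + 1 else 0
  | _, _ => 0

-- Z-value: length of the longest common prefix of s and s.drop k
def pvZ (s : List Char) (k : Nat) : Nat := pvLcp s (s.drop k)

theorem pvLcp_nil_right (as : List Char) : pvLcp as [] = 0 := by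
  cases as <;> simp [pvLcp]

theorem pvLcp_le_right (as : List Char) : ∀ bs, pvLcp as bs ≤ bs.length := by
  induction as with
  | nil => intro bs; cases bs <;> simp [pvLcp]
  | cons a as ih =>
    intro bs
    cases bs with
    | nil => simp [pvLcp]
    | cons b bs =>
      simp only [pvLcp]
      split
      · simpa using ih bs
      · simp

theorem pvLcp_get_eq (as : List Char) : ∀ bs, ∀ i < pvLcp as bs, as[i]? = bs[i]? := by
  induction as with
  | nil => intro bs i hi; simp [pvLcp] at hi
  | cons a as ih =>
    intro bs i hi
    cases bs with
    | nil => simp [pvLcp] at hi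
    | cons b bs =>
      simp only [pvLcp] at hi
      split at hi
      · cases i with
        | zero => simp [*]
        | succ i => simpa using ih bs i (by omega)
      · omega

theorem pvLcp_lt_ne (as : List Char) : ∀ bs, pvLcp as bs < as.length →
    pvLcp as bs < bs.length → as[pvLcp as bs]? ≠ bs[pvLcp as bs]? := by
  induction as with
  | nil => intro bs h1 h2; simp at h1
  | cons a as ih =>
    intro bs h1 h2
    cases bs with
    | nil => simp at h2
    | cons b bs =>
      by_cases hab : a = b
      · simp only [pvLcp, if_pos hab, List.length_cons] at *
        simpa using ih bs (by omega) (by omega)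
      · simp only [pvLcp, if_neg hab] at *
        simpa using hab

theorem pvLcp_ge_of (as : List Char) : ∀ bs (e : Nat), e ≤ as.length → e ≤ bs.length →
    (∀ i < e, as[i]? = bs[i]?) → e ≤ pvLcp as bs := by
  induction as with
  | nil =>
    intro bs e ha hb h
    simp only [List.length_nil, Nat.le_zero] at ha
    simp [ha]
  | cons a as ih =>
    intro bs e ha hb h
    cases bs with
    | nil => simp at hb; omega
    | cons b bs =>
      cases e with
      | zero => omega
      | succ e =>
        have h0 := h 0 (by omega)
        simp only [List.getElem?_cons_zero, Option.some.injEq] at h0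
        simp only [pvLcp, if_pos h0]
        have := ih bs e (by simpa using ha) (by simpa using hb)
          (fun i hi => by simpa using h (i + 1) (by omega))
        omega

theorem pvLcp_split (as : List Char) : ∀ bs (m : Nat), m ≤ as.length → m ≤ bs.length →
    (∀ i < m, as[i]? = bs[i]?) →
    pvLcp as bs = m + pvLcp (as.drop m) (bs.drop m) := by
  induction as with
  | nil => intro bs m ha hb h; simp at ha; simp [ha]
  | cons a as ih =>
    intro bs m ha hb h
    cases m with
    | zero => simp
    | succ m =>
      cases bs with
      | nil => simp at hb
      | cons b bs =>
        have h0 := h 0 (by omega)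
        simp only [List.getElem?_cons_zero, Option.some.injEq] at h0
        simp only [pvLcp, if_pos h0, List.drop_succ_cons]
        have := ih bs m (by simpa using ha) (by simpa using hb)
          (fun i hi => by simpa using h (i + 1) (by omega))
        omega

theorem pvLcp_eq_len_right_iff (as : List Char) : ∀ bs, bs.length ≤ as.length →
    (pvLcp as bs = bs.length ↔ as.take bs.length = bs) := by
  induction as with
  | nil =>
    intro bs h
    simp only [List.length_nil, Nat.le_zero] at h
    rw [List.eq_nil_of_length_eq_zero h]
    simp [pvLcp]
  | cons a as ih =>
    intro bs h
    cases bs with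
    | nil => simp [pvLcp_nil_right]
    | cons b bs =>
      simp only [pvLcp, List.length_cons, List.take_succ_cons]
      by_cases hab : a = b
      · rw [if_pos hab]
        have := ih bs (by simpa using h)
        constructor
        · intro he; simp [hab, (this.mp (by omega))]
        · intro he
          rw [List.cons_eq_cons] at he
          rw [this.mpr he.2]
      · rw [if_neg hab]
        constructor
        · omega
        · intro he; rw [List.cons_eq_cons] at he; exact absurd he.1 hab

theorem pvZ_le (s : List Char) (k : Nat) : pvZ s k ≤ s.length - k := by
  have := pvLcp_le_right s (s.drop k)
  simpa [pvZ] using this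

-- ----- loop characterizations -----
theorem pvGetD_eq (s : List Char) (i : Nat) (h : i < s.length) : s.getD i ' ' = s[i] := by
  simp [List.getD_eq_getElem?_getD, List.getElem?_eq_getElem h]

theorem pvLcp_drop_cons (s : List Char) (a b : Nat) (ha : a < s.length) (hb : b < s.length) :
    pvLcp (s.drop a) (s.drop b)
      = if s[a] = s[b] then pvLcp (s.drop (a + 1)) (s.drop (b + 1)) + 1 else 0 := by
  rw [List.drop_eq_getElem_cons ha, List.drop_eq_getElem_cons hb]
  rfl

theorem pvZ2Loop_eq_aux (s : List Char) : ∀ m ch cnt, 1 ≤ ch → s.length - ch = m →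
    pvZ2Loop s (List.range' ch m) cnt = cnt + pvLcp (s.drop (ch - 1)) (s.drop ch) := by
  intro m
  induction m with
  | zero =>
    intro ch cnt h1 hm
    have hle : s.length ≤ ch := by omega
    simp [pvZ2Loop, List.drop_eq_nil_of_le hle, pvLcp_nil_right]
  | succ m ih =>
    intro ch cnt h1 hm
    have hch : ch < s.length := by omega
    rw [List.range'_succ]
    simp only [pvZ2Loop]
    rw [pvGetD_eq s ch hch, pvGetD_eq s (ch - 1) (by omega)]
    have hstep := pvLcp_drop_cons s (ch - 1) ch (by omega) hch
    rw [show ch - 1 + 1 = ch by omega] at hstep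
    by_cases hab : s[ch - 1] = s[ch]
    · rw [if_pos hab.symm]
      rw [if_pos hab] at hstep
      rw [hstep]
      have hih := ih (ch + 1) (cnt + 1) (by omega) (by omega)
      rw [show ch + 1 - 1 = ch by omega] at hih
      rw [hih]
      omega
    · rw [if_neg (fun h => hab h.symm)]
      rw [if_neg hab] at hstep
      rw [hstep]
      simp

theorem pvZ2Loop_eq (s : List Char) : ∀ ch cnt, 1 ≤ ch → ch ≤ s.length →
    pvZ2Loop s (List.range' ch (s.length - ch)) cnt
      = cnt + pvLcp (s.drop (ch - 1)) (s.drop ch) := by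
  intro ch cnt h1 h2
  exact pvZ2Loop_eq_aux s (s.length - ch) ch cnt h1 rfl

theorem pvCase1Loop_eq_aux (s : List Char) (k : Nat) : ∀ m j cnt, k ≤ j → j ≤ s.length →
    s.length - j = m →
    pvCase1Loop s k (List.range' j m) cnt =
      (cnt + pvLcp (s.drop (j - k)) (s.drop j),
       if j + pvLcp (s.drop (j - k)) (s.drop j) = s.length then 0
       else j + pvLcp (s.drop (j - k)) (s.drop j) - 1) := by
  intro m
  induction m with
  | zero =>
    intro j cnt hk hj hm
    simp only [List.range'_zero, pvCase1Loop,
      List.drop_eq_nil_of_le (by omega : s.length ≤ j), pvLcp_nil_right]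
    rw [if_pos (by omega)]
    simp
  | succ m ih =>
    intro j cnt hk hj hm
    have hjlt : j < s.length := by omega
    rw [List.range'_succ]
    simp only [pvCase1Loop]
    rw [pvGetD_eq s j hjlt, pvGetD_eq s (j - k) (by omega)]
    have hstep := pvLcp_drop_cons s (j - k) j (by omega) hjlt
    rw [show j - k + 1 = j + 1 - k by omega] at hstep
    by_cases hab : s[j - k] = s[j]
    · rw [if_pos hab]
      rw [if_pos hab] at hstep
      rw [hstep]
      rw [ih (j + 1) (cnt + 1) (by omega) (by omega) (by omega)]
      split_ifs <;> simp only [Prod.mk.injEq, and_true, true_and] <;> omega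
    · rw [if_neg hab]
      rw [if_neg hab] at hstep
      rw [hstep]
      rw [if_neg (by omega)]
      simp

theorem pvCase1Loop_eq (s : List Char) (k : Nat) : ∀ j cnt, k ≤ j → j ≤ s.length →
    pvCase1Loop s k (List.range' j (s.length - j)) cnt =
      (cnt + pvLcp (s.drop (j - k)) (s.drop j),
       if j + pvLcp (s.drop (j - k)) (s.drop j) = s.length then 0
       else j + pvLcp (s.drop (j - k)) (s.drop j) - 1) := by
  intro j cnt hk hj
  exact pvCase1Loop_eq_aux s k (s.length - j) j cnt hk hj rfl

theorem pvCase2bLoop_eq_aux (s : List Char) (k z0 l r : Nat) : ∀ m ch, k < ch →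
    ch < s.length → s.length - ch = m →
    pvCase2bLoop s k z0 l r (List.range' ch m) =
      (if pvLcp (s.drop (ch - k)) (s.drop ch) = s.length - ch
       then (ch - k + pvLcp (s.drop (ch - k)) (s.drop ch), l, r)
       else (ch + pvLcp (s.drop (ch - k)) (s.drop ch) - k, k,
             ch + pvLcp (s.drop (ch - k)) (s.drop ch) - 1)) := by
  intro m
  induction m with
  | zero => intro ch hk hch hm; omega
  | succ m ih =>
    intro ch hk hch hm
    rw [List.range'_succ]
    simp only [pvCase2bLoop]
    rw [pvGetD_eq s ch hch, pvGetD_eq s (ch - k) (by omega)]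
    have hstep := pvLcp_drop_cons s (ch - k) ch (by omega) hch
    rw [show ch - k + 1 = ch + 1 - k by omega] at hstep
    by_cases hab : s[ch] = s[ch - k]
    · rw [if_neg (by simp [hab])]
      rw [if_pos hab.symm] at hstep
      rw [hstep]
      by_cases hend : ch + 1 = s.length
      · -- last character matched: the elif branch fires
        rw [if_pos hend]
        have h0 : pvLcp (s.drop (ch + 1 - k)) (s.drop (ch + 1)) = 0 := by
          rw [show s.drop (ch + 1) = [] from List.drop_eq_nil_of_le (by omega), pvLcp_nil_right]
        rw [h0]
        split_ifs <;> simp only [Prod.mk.injEq, and_true, true_and] <;> omega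
      · rw [if_neg hend]
        rw [ih (ch + 1) (by omega) (by omega) (by omega)]
        split_ifs <;> simp only [Prod.mk.injEq, and_true, true_and] <;> omega
    · rw [if_pos (by simpa using hab)]
      rw [if_neg (fun he => hab he.symm)] at hstep
      rw [hstep]
      rw [if_neg (by omega)]
      simp only [Prod.mk.injEq, and_true, true_and]
      omega

theorem pvCase2bLoop_eq (s : List Char) (k z0 l r : Nat) : ∀ ch, k < ch → ch < s.length →
    pvCase2bLoop s k z0 l r (List.range' ch (s.length - ch)) =
      (if pvLcp (s.drop (ch - k)) (s.drop ch) = s.length - ch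
       then (ch - k + pvLcp (s.drop (ch - k)) (s.drop ch), l, r)
       else (ch + pvLcp (s.drop (ch - k)) (s.drop ch) - k, k,
             ch + pvLcp (s.drop (ch - k)) (s.drop ch) - 1)) := by
  intro ch hk hch
  exact pvCase2bLoop_eq_aux s k z0 l r (s.length - ch) ch hk hch rfl

-- ----- Z-algorithm shift facts -----
theorem pvZ_box (s : List Char) (l r : Nat) (hz : r - l + 1 ≤ pvZ s l) :
    ∀ i, i ≤ r - l → s[i]? = s[l + i]? := by
  intro i hi
  have h := pvLcp_get_eq s (s.drop l) i (by unfold pvZ at hz; omega)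
  rwa [List.getElem?_drop] at h

theorem pvZ_case2a (s : List Char) (l r k : Nat) (hl : 1 ≤ l) (hlk : l < k) (hkr : k ≤ r)
    (hrn : r < s.length) (hb : ∀ i, i ≤ r - l → s[i]? = s[l + i]?)
    (hlt : pvZ s (k - l) < r - k + 1) : pvZ s k = pvZ s (k - l) := by
  have hzl := pvZ_le s (k - l)
  simp only [pvZ] at hlt hzl ⊢
  have hpt : ∀ i < pvLcp s (s.drop (k - l)), s[i]? = s[k + i]? := by
    intro i hi
    have h1 : s[i]? = s[(k - l) + i]? := by
      have := pvLcp_get_eq s (s.drop (k - l)) i hi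
      rwa [List.getElem?_drop] at this
    have h2 : s[(k - l) + i]? = s[l + ((k - l) + i)]? := hb ((k - l) + i) (by omega)
    rw [h1, h2]
    congr 1
    omega
  have hne : s[pvLcp s (s.drop (k - l))]? ≠ s[k + pvLcp s (s.drop (k - l))]? := by
    have hmm := pvLcp_lt_ne s (s.drop (k - l)) (by omega)
      (by rw [List.length_drop]; omega)
    rw [List.getElem?_drop] at hmm
    have h2 : s[(k - l) + pvLcp s (s.drop (k - l))]?
        = s[l + ((k - l) + pvLcp s (s.drop (k - l)))]? :=
      hb ((k - l) + pvLcp s (s.drop (k - l))) (by omega)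
    rw [show l + ((k - l) + pvLcp s (s.drop (k - l))) = k + pvLcp s (s.drop (k - l)) by omega]
      at h2
    rw [← h2]
    exact hmm
  have hge : pvLcp s (s.drop (k - l)) ≤ pvLcp s (s.drop k) := by
    apply pvLcp_ge_of
    · omega
    · rw [List.length_drop]; omega
    · intro i hi
      rw [List.getElem?_drop]
      exact hpt i hi
  have hle : pvLcp s (s.drop k) ≤ pvLcp s (s.drop (k - l)) := by
    by_contra hgt
    have := pvLcp_get_eq s (s.drop k) (pvLcp s (s.drop (k - l))) (by omega)
    rw [List.getElem?_drop] at this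
    exact hne this
  omega

theorem pvZ_case2b (s : List Char) (l r k : Nat) (hl : 1 ≤ l) (hlk : l < k) (hkr : k ≤ r)
    (hrn : r < s.length) (hb : ∀ i, i ≤ r - l → s[i]? = s[l + i]?)
    (hge : r - k + 1 ≤ pvZ s (k - l)) :
    pvZ s k = (r + 1 - k) + pvLcp (s.drop (r + 1 - k)) (s.drop (r + 1)) := by
  simp only [pvZ] at hge
  have hpt : ∀ i < r - k + 1, s[i]? = s[k + i]? := by
    intro i hi
    have h1 : s[i]? = s[(k - l) + i]? := by
      have := pvLcp_get_eq s (s.drop (k - l)) i (by omega)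
      rwa [List.getElem?_drop] at this
    have h2 : s[(k - l) + i]? = s[l + ((k - l) + i)]? := hb ((k - l) + i) (by omega)
    rw [h1, h2]
    congr 1
    omega
  have hsp := pvLcp_split s (s.drop k) (r - k + 1) (by omega)
    (by rw [List.length_drop]; omega)
    (by intro i hi; rw [List.getElem?_drop]; exact hpt i hi)
  rw [List.drop_drop] at hsp
  unfold pvZ
  rw [hsp, show r - k + 1 = r + 1 - k by omega, show k + (r + 1 - k) = r + 1 by omega]

-- ----- the gusfield invariant -----
def GusInv (s : List Char) (z : List Nat) (l r k : Nat) : Prop :=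
  z.length = s.length ∧ 2 ≤ k ∧
  (∀ j, 1 ≤ j → j < k → j < s.length → z.getD j 0 = pvZ s j) ∧
  (k ≤ r → 1 ≤ l ∧ l < k ∧ r + 2 ≤ s.length ∧ r - l + 1 ≤ pvZ s l)

theorem pvGetDNat_set_self (z : List Nat) (k v : Nat) (h : k < z.length) :
    (z.set k v).getD k 0 = v := by
  simp [List.getD_eq_getElem?_getD, h]

theorem pvGetDNat_set_ne (z : List Nat) (k v j : Nat) (h : j ≠ k) :
    (z.set k v).getD j 0 = z.getD j 0 := by
  simp [List.getD_eq_getElem?_getD, List.getElem?_set_ne (Ne.symm h)]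

theorem pvEntriesSet (s : List Char) (z : List Nat) (k v : Nat)
    (hzlen : z.length = s.length) (hkn : k < s.length)
    (hent : ∀ j, 1 ≤ j → j < k → j < s.length → z.getD j 0 = pvZ s j)
    (hv : v = pvZ s k) :
    ∀ j, 1 ≤ j → j < k + 1 → j < s.length → (z.set k v).getD j 0 = pvZ s j := by
  intro j hj1 hj2 hj3
  by_cases hjk : j = k
  · subst hjk
    rw [pvGetDNat_set_self z j v (by omega), hv]
  · rw [pvGetDNat_set_ne z k v j hjk]
    exact hent j hj1 (by omega) hj3

theorem pvGusMain_correct (s : List Char) : ∀ d k z l r, s.length - k ≤ d → k ≤ s.length →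
    GusInv s z l r k →
    ∀ j, 1 ≤ j → j < s.length →
      (pvGusMain s (List.range' k (s.length - k)) z l r).getD j 0 = pvZ s j := by
  intro d
  induction d with
  | zero =>
    intro k z l r hd hk hinv j hj1 hj2
    obtain ⟨hzlen, hk2, hentries, hbox⟩ := hinv
    rw [show s.length - k = 0 by omega]
    simp only [List.range'_zero, pvGusMain]
    exact hentries j hj1 (by omega) hj2
  | succ d ih =>
    intro k z l r hd hk hinv j hj1 hj2
    by_cases hkn : k < s.length
    case neg =>
      obtain ⟨hzlen, hk2, hentries, hbox⟩ := hinv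
      rw [show s.length - k = 0 by omega]
      simp only [List.range'_zero, pvGusMain]
      exact hentries j hj1 (by omega) hj2
    case pos =>
      obtain ⟨hzlen, hk2, hentries, hbox⟩ := hinv
      rw [show s.length - k = (s.length - (k + 1)) + 1 by omega, List.range'_succ]
      simp only [pvGusMain]
      by_cases hcase1 : k > r
      · rw [if_pos hcase1]
        have hc1 := pvCase1Loop_eq s k k 0 (le_refl k) (by omega)
        rw [show k - k = 0 by omega, List.drop_zero] at hc1
        simp only [Nat.zero_add] at hc1
        rw [hc1]
        dsimp only
        have hzk : pvLcp s (s.drop k) = pvZ s k := rfl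
        have hzkle : pvZ s k ≤ s.length - k := pvZ_le s k
        by_cases hz0 : pvLcp s (s.drop k) > 0
        · simp only [if_pos hz0]
          refine ih (k + 1) _ _ _ (by omega) (by omega) ?_ j hj1 hj2
          refine ⟨by simpa using hzlen, by omega,
            pvEntriesSet s z k _ hzlen hkn hentries hzk, ?_⟩
          intro hkq
          by_cases hfull : k + pvLcp s (s.drop k) = s.length
          · rw [if_pos hfull] at hkq
            omega
          · rw [if_neg hfull] at hkq
            rw [if_neg hfull]
            refine ⟨by omega, by omega, by omega, by rw [hzk] at hz0 ⊢; omega⟩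
        · simp only [if_neg hz0]
          refine ih (k + 1) _ _ _ (by omega) (by omega) ?_ j hj1 hj2
          refine ⟨by simpa using hzlen, by omega,
            pvEntriesSet s z k _ hzlen hkn hentries hzk, ?_⟩
          intro hkr
          omega
      · rw [if_neg hcase1]
        have hkr : k ≤ r := by omega
        obtain ⟨hl1, hlk, hrn2, hboxz⟩ := hbox hkr
        have hbx := pvZ_box s l r hboxz
        have hkl : z.getD (k - l) 0 = pvZ s (k - l) :=
          hentries (k - l) (by omega) (by omega) (by omega)
        by_cases h2a : z.getD (k - l) 0 < r - k + 1
        · rw [if_pos h2a]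
          have hzk : pvZ s k = pvZ s (k - l) :=
            pvZ_case2a s l r k hl1 hlk hkr (by omega) hbx (by omega)
          refine ih (k + 1) _ _ _ (by omega) (by omega) ?_ j hj1 hj2
          refine ⟨by simpa using hzlen, by omega,
            pvEntriesSet s z k _ hzlen hkn hentries (by rw [hkl, hzk]), ?_⟩
          intro hkr'
          exact ⟨by omega, by omega, by omega, by omega⟩
        · rw [if_neg h2a]
          have hzk := pvZ_case2b s l r k hl1 hlk hkr (by omega) hbx (by omega)
          have hc2b := pvCase2bLoop_eq s k 0 l r (r + 1) (by omega) (by omega)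
          rw [hc2b]
          have hele : pvLcp (s.drop (r + 1 - k)) (s.drop (r + 1)) ≤ s.length - (r + 1) := by
            have := pvLcp_le_right (s.drop (r + 1 - k)) (s.drop (r + 1))
            rwa [List.length_drop] at this
          by_cases hfull : pvLcp (s.drop (r + 1 - k)) (s.drop (r + 1)) = s.length - (r + 1)
          · rw [if_pos hfull]
            dsimp only
            refine ih (k + 1) _ _ _ (by omega) (by omega) ?_ j hj1 hj2
            refine ⟨by simpa using hzlen, by omega,
              pvEntriesSet s z k _ hzlen hkn hentries (by omega), ?_⟩
            intro hkr'
            exact ⟨by omega, by omega, by omega, by omega⟩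
          · rw [if_neg hfull]
            dsimp only
            refine ih (k + 1) _ _ _ (by omega) (by omega) ?_ j hj1 hj2
            refine ⟨by simpa using hzlen, by omega,
              pvEntriesSet s z k _ hzlen hkn hentries (by omega), ?_⟩
            intro hkr'
            refine ⟨by omega, by omega, by omega, by omega⟩

-- non-uniform strings have pvZ s 1 ≤ length - 2
def pvUniform (l : List Char) : Prop := ∀ c ∈ l, c = l.headD ' '

theorem pvUniform_of_shift (s : List Char)
    (hpt : ∀ i < s.length - 1, s[i]? = s[1 + i]?) : pvUniform s := by
  have hall : ∀ j < s.length, s[j]? = s[0]? := by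
    intro j
    induction j with
    | zero => intro _; rfl
    | succ j ihj =>
      intro hj
      have hstep := hpt j (by omega)
      rw [show 1 + j = j + 1 by omega] at hstep
      rw [← hstep]
      exact ihj (by omega)
  intro c hc
  obtain ⟨j, hj, rfl⟩ := List.getElem_of_mem hc
  have h0 : s[0]? = some (s.headD ' ') := by
    cases s with
    | nil => simp at hj
    | cons a t => simp
  have hj0 := hall j hj
  rw [List.getElem?_eq_getElem hj, h0] at hj0
  exact Option.some.inj hj0

theorem pvUniform_of_Z1 (s : List Char) (h : pvZ s 1 + 1 = s.length) : pvUniform s := by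
  apply pvUniform_of_shift
  intro i hi
  have := pvLcp_get_eq s (s.drop 1) i (by unfold pvZ at h; omega)
  rwa [List.getElem?_drop] at this

theorem pvUniform_pair (l : List Char) : pvUniform l ↔ ∀ a ∈ l, ∀ b ∈ l, a = b := by
  cases l with
  | nil => simp [pvUniform]
  | cons x t =>
    constructor
    · intro h a ha b hb
      rw [h a ha, h b hb]
    · intro h c hc
      simpa using h c hc x (by simp)

theorem pvUniform_reverse (s : List Char) : pvUniform s.reverse ↔ pvUniform s := by
  rw [pvUniform_pair, pvUniform_pair]
  simp

theorem pvGetD_repl_set (n v j : Nat) (hj : j < n) :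
    ((List.replicate n (0 : Nat)).set 1 v).getD j 0 = if j = 1 then v else 0 := by
  by_cases hj1 : j = 1
  · subst hj1
    rw [pvGetDNat_set_self _ _ _ (by simpa using hj), if_pos rfl]
  · rw [pvGetDNat_set_ne _ _ _ _ hj1, if_neg hj1]
    simp [List.getD_eq_getElem?_getD, hj]

theorem pvGusfield_correct (s : List Char)
    (h : s.length ≤ 2 ∨ pvZ s 1 + 2 ≤ s.length) :
    ∀ j, 1 ≤ j → j < s.length → (pvGusfield s).getD j 0 = pvZ s j := by
  intro j hj1 hj2
  unfold pvGusfield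
  by_cases hn : s.length > 1
  · rw [if_pos hn]
    have hz2 := pvZ2Loop_eq s 1 0 (le_refl 1) (by omega)
    rw [show (1 : Nat) - 1 = 0 by omega, List.drop_zero, Nat.zero_add] at hz2
    rw [hz2]
    have hz1 : pvLcp s (s.drop 1) = pvZ s 1 := rfl
    by_cases he : pvLcp s (s.drop 1) = 0
    · rw [if_pos he, he]
      apply pvGusMain_correct s (s.length) 2 _ 0 0 (by omega) (by omega) _ j hj1 hj2
      refine ⟨by simp, le_refl 2, ?_, by omega⟩
      intro j' hj'1 hj'2 hj'3
      rw [pvGetD_repl_set _ _ _ (by simpa using hj'3)]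
      rw [if_pos (by omega), show j' = 1 by omega, ← hz1, he]
    · rw [if_neg he]
      apply pvGusMain_correct s (s.length) 2 _ 1 (pvLcp s (s.drop 1)) (by omega) (by omega)
        _ j hj1 hj2
      refine ⟨by simp, le_refl 2, ?_, ?_⟩
      · intro j' hj'1 hj'2 hj'3
        rw [pvGetD_repl_set _ _ _ (by simpa using hj'3)]
        rw [if_pos (by omega), hz1]
        rw [show j' = 1 by omega]
      · intro hr
        have hle := pvZ_le s 1
        rw [← hz1] at hle
        refine ⟨le_refl 1, by omega, by rw [hz1] at *; omega, by rw [hz1]; omega⟩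
  · rw [if_neg hn]
    omega

-- ----- border characterization -----
theorem pvBorder_iff (s : List Char) (i : Nat) (h1 : 1 ≤ i) (h2 : i < s.length) :
    (pvZ s.reverse (s.length - i) = i ↔ s.take i = s.drop (s.length - i)) := by
  unfold pvZ
  have hd : s.reverse.drop (s.length - i) = (s.take i).reverse := by
    rw [List.drop_reverse, show s.length - (s.length - i) = i by omega]
  have ht : s.reverse.take i = (s.drop (s.length - i)).reverse := by
    rw [List.take_reverse]
  have hlen : ((s.take i).reverse).length = i := by
    simp [List.length_take]
    omega
  have hiff := pvLcp_eq_len_right_iff s.reverse ((s.take i).reverse)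
    (by rw [hlen]; simp; omega)
  rw [hd]
  constructor
  · intro hE
    have hpre := hiff.mp (hE.trans hlen.symm)
    rw [hlen, ht] at hpre
    exact (List.reverse_injective hpre).symm
  · intro hTD
    have hpre : s.reverse.take ((s.take i).reverse).length = (s.take i).reverse := by
      rw [hlen, ht, ← hTD]
    exact (hiff.mpr hpre).trans hlen

-- ----- the two output loops agree -----
theorem pvGetDInt_set_self (m : List Int) (k : Nat) (v : Int) (h : k < m.length) :
    (m.set k v).getD k 0 = v := by
  simp [List.getD_eq_getElem?_getD, h]

theorem pvGetDInt_set_ne (m : List Int) (k : Nat) (v : Int) (j : Nat) (h : j ≠ k) :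
    (m.set k v).getD j 0 = m.getD j 0 := by
  simp [List.getD_eq_getElem?_getD, List.getElem?_set_ne (Ne.symm h)]

-- Joint induction: A's z-test and B's border-test are pointwise equivalent (hiff), and where
-- they fire the stored z-value is exactly the border length (hval); then the loops agree.
theorem pvMir_eq_alt_aux (s : List Char) (z : List Nat) (hzl : z.length = s.length)
    (hiff : ∀ i, 1 ≤ i → i < s.length →
      ((s.length - i) + z.getD (s.length - i) 0 = s.length ↔
        s.take i = s.drop (s.length - i)))
    (hval : ∀ i, 1 ≤ i → i < s.length →
      (s.length - i) + z.getD (s.length - i) 0 = s.length → z.getD (s.length - i) 0 = i) :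
    ∀ d (i prev : Nat) (m : List Int), 1 ≤ i → s.length - i = d →
      m.length = s.length + 1 → m.getD (i - 1) 0 = (prev : Int) →
      pvMirLoop s.length z (List.range' i d) m = pvAltLoop s (List.range' i d) prev m := by
  intro d
  induction d with
  | zero => intro i prev m _ _ _ _; rfl
  | succ d ih =>
    intro i prev m hi hd hm hprev
    have hin : i < s.length := by omega
    rw [List.range'_succ]
    simp only [pvMirLoop, pvAltLoop]
    rw [hzl]
    by_cases hc : s.take i = s.drop (s.length - i)
    · have hcA := (hiff i hi hin).mpr hc
      have hzi := hval i hi hin hcA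
      rw [if_pos hcA, if_pos hc, hzi]
      exact ih (i + 1) i (m.set i (i : Int)) (by omega) (by omega) (by simpa using hm)
        (by rw [show i + 1 - 1 = i by omega]
            exact pvGetDInt_set_self m i _ (by omega))
    · rw [if_neg (fun hA => hc ((hiff i hi hin).mp hA)), if_neg hc, hprev]
      exact ih (i + 1) prev (m.set i (prev : Int)) (by omega) (by omega) (by simpa using hm)
        (by rw [show i + 1 - 1 = i by omega]
            exact pvGetDInt_set_self m i _ (by omega))

theorem pvAltLoop_length (s : List Char) :
    ∀ is prev m, (pvAltLoop s is prev m).length = m.length := by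
  intro is
  induction is with
  | nil => intro prev m; rfl
  | cons i rest ih =>
    intro prev m
    simp only [pvAltLoop]
    rw [ih, List.length_set]

theorem pvMirLoop_length (n : Nat) (z : List Nat) :
    ∀ is m, (pvMirLoop n z is m).length = m.length := by
  intro is
  induction is with
  | nil => intro m; rfl
  | cons i rest ih =>
    intro m
    simp only [pvMirLoop]
    split <;> rw [ih] <;> simp

theorem pvGusMain_length (s : List Char) :
    ∀ ks z l r, (pvGusMain s ks z l r).length = z.length := by
  intro ks
  induction ks with
  | nil => intro z l r; rfl
  | cons k rest ih =>
    intro z l r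
    simp only [pvGusMain]
    split
    · split <;> rw [ih] <;> simp
    · split <;> rw [ih] <;> simp

theorem pvGusfield_length (s : List Char) : (pvGusfield s).length = s.length := by
  unfold pvGusfield
  dsimp only
  split
  · split <;> rw [pvGusMain_length] <;> simp
  · rw [pvGusMain_length]
    simp

-- ----- the degenerate run of A's gusfield on uniform strings -----
theorem pvUniform_getElem (s : List Char) (hu : pvUniform s) (j : Nat) (hj : j < s.length) :
    s[j] = s.headD ' ' := hu _ (List.getElem_mem hj)

theorem pvZ_uniform1 (s : List Char) (hu : pvUniform s) (h1 : 1 ≤ s.length) :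
    pvZ s 1 = s.length - 1 := by
  have hge : s.length - 1 ≤ pvZ s 1 := by
    apply pvLcp_ge_of
    · omega
    · rw [List.length_drop]
    · intro i hi
      rw [List.getElem?_drop, List.getElem?_eq_getElem (by omega),
        List.getElem?_eq_getElem (by omega : 1 + i < s.length)]
      rw [pvUniform_getElem s hu i (by omega), pvUniform_getElem s hu (1 + i) (by omega)]
  have hle := pvZ_le s 1
  omega

theorem pvUniform_border (s : List Char) (hu : pvUniform s) (i : Nat) (hi : i ≤ s.length) :
    s.take i = s.drop (s.length - i) := by
  apply List.ext_getElem?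
  intro j
  by_cases hj : j < i
  · rw [List.getElem?_take, if_pos hj, List.getElem?_drop]
    rw [List.getElem?_eq_getElem (by omega), List.getElem?_eq_getElem (by omega)]
    rw [pvUniform_getElem s hu j (by omega),
      pvUniform_getElem s hu (s.length - i + j) (by omega)]
  · rw [List.getElem?_eq_none (by rw [List.length_take]; omega),
      List.getElem?_eq_none (by rw [List.length_drop]; omega)]

theorem pvGusMainUniform (s : List Char) (hu : pvUniform s) (h3 : 3 ≤ s.length) :
    ∀ d k z, 2 ≤ k → k ≤ s.length → s.length - k ≤ d → z.length = s.length →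
      z.getD 1 0 = s.length - 1 → (∀ j, j ≠ 1 → z.getD j 0 = 0) →
      ∀ j,
        (pvGusMain s (List.range' k (s.length - k)) z 1 (s.length - 1)).getD j 0
          = if j = 1 then s.length - 1 else 0 := by
  intro d
  induction d with
  | zero =>
    intro k z hk2 hkn hd hzl hz1 hz0 j
    rw [show s.length - k = 0 by omega]
    by_cases hj : j = 1
    · subst hj; rw [if_pos rfl]; exact hz1
    · rw [if_neg hj]; exact hz0 j hj
  | succ d ih =>
    intro k z hk2 hkn hd hzl hz1 hz0 j
    by_cases hklt : k < s.length
    · rw [show s.length - k = (s.length - (k + 1)) + 1 by omega, List.range'_succ]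
      simp only [pvGusMain]
      rw [if_neg (by omega)]
      by_cases hk2' : k = 2
      · subst hk2'
        rw [show (2 : Nat) - 1 = 1 from rfl, hz1]
        rw [if_neg (by omega)]
        rw [show s.length - (s.length - 1 + 1) = 0 by omega]
        simp only [List.range'_zero, pvCase2bLoop]
        refine ih 3 _ (by omega) (by omega) (by omega) (by simpa using hzl) ?_ ?_ j
        · rw [pvGetDNat_set_ne _ _ _ _ (by omega)]
          exact hz1
        · intro j' hj'
          by_cases hj2 : j' = 2
          · subst hj2
            exact pvGetDNat_set_self _ _ _ (by omega)
          · rw [pvGetDNat_set_ne _ _ _ _ hj2]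
            exact hz0 j' hj'
      · rw [hz0 (k - 1) (by omega)]
        rw [if_pos (by omega)]
        refine ih (k + 1) _ (by omega) (by omega) (by omega) (by simpa using hzl) ?_ ?_ j
        · rw [pvGetDNat_set_ne _ _ _ _ (by omega)]
          exact hz1
        · intro j' hj'
          by_cases hjk : j' = k
          · subst hjk
            exact pvGetDNat_set_self _ _ _ (by omega)
          · rw [pvGetDNat_set_ne _ _ _ _ hjk]
            exact hz0 j' hj'
    · rw [show s.length - k = 0 by omega]
      by_cases hj : j = 1
      · subst hj; rw [if_pos rfl]; exact hz1
      · rw [if_neg hj]; exact hz0 j hj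

theorem pvGusfieldUniform (s : List Char) (hu : pvUniform s) (h3 : 3 ≤ s.length) :
    ∀ j, (pvGusfield s).getD j 0 = if j = 1 then s.length - 1 else 0 := by
  intro j
  unfold pvGusfield
  rw [if_pos (by omega)]
  have hz2 := pvZ2Loop_eq s 1 0 (le_refl 1) (by omega)
  rw [show (1 : Nat) - 1 = 0 by omega, List.drop_zero, Nat.zero_add] at hz2
  have hz1 : pvLcp s (s.drop 1) = s.length - 1 := pvZ_uniform1 s hu (by omega)
  rw [hz2, hz1]
  rw [if_neg (by omega)]
  refine pvGusMainUniform s hu h3 s.length 2 _ (le_refl 2) (by omega) (by omega)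
    (by simp) ?_ ?_ j
  · rw [pvGetD_repl_set _ _ _ (by omega), if_pos rfl]
  · intro j' hj'
    by_cases hlt : j' < s.length
    · rw [pvGetD_repl_set _ _ _ hlt, if_neg hj']
    · rw [List.getD_eq_getElem?_getD, List.getElem?_eq_none (by simp; omega)]
      rfl

-- ----- getD-preservation of the output loops (for the tightness proof) -----
theorem pvMirLoop_getD_ne (n : Nat) (z : List Nat) :
    ∀ is (m : List Int) (t : Nat), (∀ j ∈ is, j ≠ t) →
      (pvMirLoop n z is m).getD t 0 = m.getD t 0 := by
  intro is
  induction is with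
  | nil => intro m t _; rfl
  | cons i rest ih =>
    intro m t h
    simp only [pvMirLoop]
    split <;>
      rw [ih _ t (fun j hj => h j (List.mem_cons_of_mem i hj)),
        pvGetDInt_set_ne _ _ _ _ (fun he => h i (List.mem_cons_self) he.symm)]

theorem pvAltLoop_getD_ne (s : List Char) :
    ∀ is prev (m : List Int) (t : Nat), (∀ j ∈ is, j ≠ t) →
      (pvAltLoop s is prev m).getD t 0 = m.getD t 0 := by
  intro is
  induction is with
  | nil => intro prev m t _; rfl
  | cons i rest ih =>
    intro prev m t h
    simp only [pvAltLoop]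
    rw [ih _ _ t (fun j hj => h j (List.mem_cons_of_mem i hj)),
      pvGetDInt_set_ne _ _ _ _ (fun he => h i (List.mem_cons_self) he.symm)]

-- ===== VERDICT (by name: the statements are the Claim_ definitions above) =====
theorem mirroredMatchedPrefix_spec : Claim_unchanged_mirroredMatchedPrefix := by
  intro pattern _hdom hnD
  unfold D_mirroredMatchedPrefix at hnD
  unfold mirroredMatchedPrefix mirroredMatchedPrefix_alt
  dsimp only
  set s := pattern.toList with hs
  have hrevlen : s.reverse.length = s.length := by simp
  have hzlen : (pvGusfield s.reverse).length = s.length := by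
    rw [pvGusfield_length, hrevlen]
  -- not in D_: s is short or not uniform
  have hsmall : s.length ≤ 2 ∨ ¬ pvUniform s := by
    by_cases h3 : 3 ≤ s.length
    · right
      exact fun hu =>
        hnD ⟨h3, List.all_eq_true.mpr (fun c hc => beq_iff_eq.mpr (hu c hc))⟩
    · left; omega
  have hcond : s.reverse.length ≤ 2 ∨ pvZ s.reverse 1 + 2 ≤ s.reverse.length := by
    rcases hsmall with h2 | hnu
    · left; omega
    · right
      have hnur : ¬ pvUniform s.reverse := fun hu => hnu ((pvUniform_reverse s).mp hu)
      have hle := pvZ_le s.reverse 1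
      rw [hrevlen] at hle
      rw [hrevlen]
      have hpos : 1 ≤ s.length := by
        by_contra h0
        refine hnu ?_
        intro c hc
        rw [List.eq_nil_of_length_eq_zero (by omega : s.length = 0)] at hc
        simp at hc
      by_contra hlt
      have h11 : pvZ s.reverse 1 + 1 = s.reverse.length := by rw [hrevlen]; omega
      exact hnur (pvUniform_of_Z1 s.reverse h11)
  have hz := pvGusfield_correct s.reverse hcond
  rw [hrevlen] at hz
  have hiff : ∀ i, 1 ≤ i → i < s.length →
      ((s.length - i) + (pvGusfield s.reverse).getD (s.length - i) 0 = s.length ↔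
        s.take i = s.drop (s.length - i)) := by
    intro i hi1 hi2
    rw [hz (s.length - i) (by omega) (by omega)]
    have hle := pvZ_le s.reverse (s.length - i)
    rw [hrevlen] at hle
    constructor
    · intro hE
      exact (pvBorder_iff s i hi1 hi2).mp (by omega)
    · intro hb
      have := (pvBorder_iff s i hi1 hi2).mpr hb
      omega
  have hval : ∀ i, 1 ≤ i → i < s.length →
      (s.length - i) + (pvGusfield s.reverse).getD (s.length - i) 0 = s.length →
      (pvGusfield s.reverse).getD (s.length - i) 0 = i := by
    intro i hi1 hi2 hE
    omega
  have hmir := pvMir_eq_alt_aux s (pvGusfield s.reverse) hzlen hiff hval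
    (s.length - 1) 1 0 (List.replicate (s.length + 1) (0 : Int)) (le_refl 1) rfl
    (by simp) (by simp)
  rw [hmir, pvAltLoop_length, List.length_replicate]
  simp

theorem mirroredMatchedPrefix_changed : Claim_changed_mirroredMatchedPrefix := by
  unfold Claim_changed_mirroredMatchedPrefix
  exact ⟨by decide, by decide, by decide, by decide, by decide⟩

theorem mirroredMatchedPrefix_tight : Claim_exact_mirroredMatchedPrefix := by
  intro pattern _hdom hD heq
  obtain ⟨h3, hu⟩ := hD
  have hu' : pvUniform pattern.toList :=
    fun c hc => beq_iff_eq.mp (List.all_eq_true.mp hu c hc)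
  set s := pattern.toList with hs
  have hur : pvUniform s.reverse := (pvUniform_reverse s).mpr hu'
  have hrevlen : s.reverse.length = s.length := by simp
  have hzv := pvGusfieldUniform s.reverse hur (by omega)
  rw [hrevlen] at hzv
  have hzlen : (pvGusfield s.reverse).length = s.length := by
    rw [pvGusfield_length, hrevlen]
  have hm0 : (List.replicate (s.length + 1) (0 : Int)).getD 0 0 = 0 := by
    simp [List.getD_eq_getElem?_getD]
  have hrange : List.range' 1 (s.length - 1) = 1 :: List.range' 2 (s.length - 2) := by
    rw [show s.length - 1 = (s.length - 2) + 1 by omega, List.range'_succ]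
  have hne1 : ∀ j ∈ List.range' 2 (s.length - 2), j ≠ 1 := by
    intro j hj
    rw [List.mem_range'_1] at hj
    omega
  -- entry 1 of A's output is 0
  have hA1 : (mirroredMatchedPrefix pattern).getD 1 0 = 0 := by
    unfold mirroredMatchedPrefix
    dsimp only
    rw [← hs, pvMirLoop_length, List.length_replicate,
      show s.length + 1 - 1 = s.length by omega]
    rw [pvGetDInt_set_ne _ _ _ _ (by omega)]
    rw [hrange]
    simp only [pvMirLoop]
    rw [hzlen, hzv (s.length - 1), if_neg (by omega : ¬ s.length - 1 = 1),
      if_neg (by omega : ¬ s.length - 1 + (0 : Nat) = s.length)]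
    rw [pvMirLoop_getD_ne _ _ _ _ _ hne1]
    rw [show (1 : Nat) - 1 = 0 from rfl, hm0]
    exact pvGetDInt_set_self _ _ _ (by simp; omega)
  -- entry 1 of B's output is 1
  have hB1 : (mirroredMatchedPrefix_alt pattern).getD 1 0 = 1 := by
    unfold mirroredMatchedPrefix_alt
    dsimp only
    rw [← hs]
    rw [pvGetDInt_set_ne _ _ _ _ (by omega)]
    rw [hrange]
    simp only [pvAltLoop]
    rw [if_pos (pvUniform_border s hu' 1 (by omega))]
    rw [pvAltLoop_getD_ne _ _ _ _ _ hne1]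
    exact pvGetDInt_set_self _ _ _ (by simp; omega)
  rw [heq, hB1] at hA1
  exact absurd hA1 (by norm_num)
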